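-- pv_equiv track=rewrite | github.com/jaanshaida/basic_python_interview_programs | picking_tickets.py | maxTickets
-- ===== SOURCE A (Python) =====
-- def maxTickets(tickets):
--     tickets.sort()
--     max_length = 1
--     current_length = 1
--     for i in range(1, len(tickets)):
--         if tickets[i] - tickets[i - 1] <= 1:
--             current_length += 1
--             max_length = max(max_length, current_length)
--         else:
--             current_length = 1
--     return max_length
-- ===== SOURCE B (Python) =====
-- def maxTickets(tickets):
--     # Same in-place sort as A; return-value equivalence is what is claimed.
--     tickets.sort()
--     segments = [[]]
--     prev = None
--     for t in tickets:
--         if prev is not None and t - prev > 1: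
--             segments.append([])
--         segments[-1].append(t)
--         prev = t
--     best = max((len(seg) for seg in segments), default=0)
--     return max(best, 1)
-- ===== Notes on version B (the rewrite author's own statement) =====
-- stated objective: alternative
-- what changed: Instead of A's index loop over range(1, len) maintaining a (max_length, current_length) counter pair, B splits the sorted list into explicit segments at gaps > 1 and returns the maximum segment length (at least 1).
import Mathlib
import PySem

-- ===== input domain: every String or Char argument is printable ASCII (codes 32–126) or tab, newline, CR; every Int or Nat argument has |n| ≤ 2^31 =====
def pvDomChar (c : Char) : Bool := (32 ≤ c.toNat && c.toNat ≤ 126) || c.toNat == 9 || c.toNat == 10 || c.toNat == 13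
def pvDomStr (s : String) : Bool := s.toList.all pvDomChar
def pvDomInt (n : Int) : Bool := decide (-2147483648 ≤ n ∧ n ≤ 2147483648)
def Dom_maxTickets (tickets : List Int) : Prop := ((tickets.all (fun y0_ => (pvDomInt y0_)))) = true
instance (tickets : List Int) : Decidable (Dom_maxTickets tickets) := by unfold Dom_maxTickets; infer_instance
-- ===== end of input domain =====

-- B re-decomposes the task: after sorting it splits the list into segments at gaps > 1 and
-- returns the longest segment length, instead of A's index loop with a running (max, current) pair.
-- Both Pythons sort `tickets` in place (the same mutation); the equivalence proved is about the return value.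

-- ===== PORT A =====
-- the for-loop over range(1, len(tickets)) with the (max_length, current_length) state
def maxTicketsLoop (s : List Int) : Int :=
  ((PySem.List.pyRange 1 (PySem.List.len s)).foldl
    (fun (st : Int × Int) i =>
      if PySem.List.pyGetD s i 0 - PySem.List.pyGetD s (i - 1) 0 ≤ 1 then
        (max st.1 (st.2 + 1), st.2 + 1)
      else (st.1, 1)) (1, 1)).1

def maxTickets (tickets : List Int) : Int :=
  maxTicketsLoop (PySem.List.sorted tickets (fun x => x))

-- ===== PORT B =====
-- loop body of Source B: maybe open a new segment, then append t to the last segment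
def stepB (p : List (List Int) × Option Int) (t : Int) : List (List Int) × Option Int :=
  let segs := match p.2 with
    | some prev => if t - prev > 1 then p.1 ++ [[]] else p.1
    | none => p.1
  (segs.dropLast ++ [segs.getLastD [] ++ [t]], some t)

def maxTicketsAltCore (s : List Int) : Int :=
  let fin := s.foldl stepB ([[]], none)
  let best := PySem.List.maxD (fin.1.map (fun seg => PySem.List.len seg)) (fun y => y) 0
  max best 1

def maxTickets_alt (tickets : List Int) : Int :=
  maxTicketsAltCore (PySem.List.sorted tickets (fun x => x))

-- ===== PRECONDITION & SPEC =====
def Spec_maxTickets (tickets : List Int) (out : Int) : Prop := out = maxTickets_alt tickets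
instance (tickets : List Int) (out : Int) : Decidable (Spec_maxTickets tickets out) := by unfold Spec_maxTickets; infer_instance

-- ===== CLAIM (what is proved, stated in full; the proofs are below) =====
def Claim_equal_maxTickets : Prop := ∀ (tickets : List Int), Dom_maxTickets tickets → Spec_maxTickets tickets (maxTickets tickets)

-- ===== LEMMAS AND PROOFS =====

-- A's loop as a structural recursion over adjacent pairs
def runA : Int → List Int → Int × Int → Int × Int
  | _, [], st => st
  | y, z :: t, st =>
      runA z t (if z - y ≤ 1 then (max st.1 (st.2 + 1), st.2 + 1) else (st.1, 1))

-- the final current_length / max_length values, characterised structurally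
def resCur : Int → List Int → Int → Int
  | _, [], c => c
  | y, z :: t, c => if z - y ≤ 1 then resCur z t (c + 1) else resCur z t 1

def resMax : Int → List Int → Int → Int
  | _, [], c => c
  | y, z :: t, c => if z - y ≤ 1 then resMax z t (c + 1) else max c (resMax z t 1)

-- B's segment construction as a structural recursion
def segsOf : Int → List Int → List Int → List (List Int)
  | _, [], cur => [cur]
  | prev, t :: ts, cur =>
      if t - prev > 1 then cur :: segsOf t ts [t] else segsOf t ts (cur ++ [t])

lemma le_resMax : ∀ (t : List Int) (y c : Int), c ≤ resMax y t c := by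
  intro t
  induction t with
  | nil => intro y c; simp [resMax]
  | cons z t ih =>
    intro y c
    by_cases h : z - y ≤ 1
    · simp only [resMax, if_pos h]
      exact le_trans (by omega) (ih z (c + 1))
    · simp only [resMax, if_neg h]
      exact le_max_left _ _

lemma runA_char : ∀ (t : List Int) (y m c : Int), 1 ≤ c → c ≤ m →
    runA y t (m, c) = (max m (resMax y t c), resCur y t c) := by
  intro t
  induction t with
  | nil =>
    intro y m c h1 h2
    simp [runA, resMax, resCur, max_eq_left h2]
  | cons z t ih =>
    intro y m c h1 h2
    by_cases h : z - y ≤ 1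
    · simp only [runA, resMax, resCur, if_pos h]
      rw [ih z (max m (c + 1)) (c + 1) (by omega) (le_max_right _ _)]
      rw [max_assoc, max_eq_right (le_resMax t z (c + 1))]
    · simp only [runA, resMax, resCur, if_neg h]
      rw [ih z m 1 le_rfl (by omega)]
      rw [← max_assoc, max_eq_left h2]

-- bridge: A's index loop over range(1, len) equals the adjacent-pair recursion runA
lemma bridgeA : ∀ (t : List Int) (x : Int) (st : Int × Int),
    (List.range t.length).foldl
      (fun st k =>
        if (x :: t).getD (k + 1) 0 - (x :: t).getD k 0 ≤ 1 then
          (max st.1 (st.2 + 1), st.2 + 1)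
        else (st.1, 1)) st = runA x t st := by
  intro t
  induction t with
  | nil => intro x st; rfl
  | cons z t ih =>
    intro x st
    simp only [List.length_cons]
    rw [List.range_succ_eq_map, List.foldl_cons, List.foldl_map]
    simp only [List.getD_cons_succ, List.getD_cons_zero, Nat.succ_eq_add_one]
    rw [show (runA x (z :: t) st =
      runA z t (if z - x ≤ 1 then (max st.1 (st.2 + 1), st.2 + 1) else (st.1, 1))) from rfl]
    exact ih z _

lemma loopA_eq : ∀ (x : Int) (t : List Int),
    maxTicketsLoop (x :: t) = resMax x t 1 := by
  intro x t
  unfold maxTicketsLoop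
  rw [PySem.List.len_eq, PySem.List.pyRange_one]
  have hn : (((x :: t).length : Int) - 1).toNat = t.length := by
    simp [List.length_cons]
  rw [hn, List.foldl_map]
  have hfun : (fun (st : Int × Int) (k : Nat) =>
      if PySem.List.pyGetD (x :: t) (1 + (k : Int)) 0 - PySem.List.pyGetD (x :: t) (1 + (k : Int) - 1) 0 ≤ 1 then
        (max st.1 (st.2 + 1), st.2 + 1)
      else (st.1, 1)) = (fun (st : Int × Int) (k : Nat) =>
      if (x :: t).getD (k + 1) 0 - (x :: t).getD k 0 ≤ 1 then
        (max st.1 (st.2 + 1), st.2 + 1)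
      else (st.1, 1)) := by
    funext st k
    have h1 : (1 + (k : Int)) = ((k + 1 : Nat) : Int) := by push_cast; ring
    have h2 : (1 + (k : Int) - 1) = ((k : Nat) : Int) := by omega
    have h2' : ((k + 1 : Nat) : Int) - 1 = ((k : Nat) : Int) := by push_cast; ring
    rw [h1, h2', PySem.List.pyGetD_natCast, PySem.List.pyGetD_natCast]
  rw [hfun, bridgeA t x (1, 1), runA_char t x 1 1 le_rfl le_rfl]
  simp [max_eq_right (le_resMax t x 1)]

-- B's foldl builds exactly the segments of segsOf
lemma B_fold : ∀ (ts : List Int) (prev : Int) (acc : List (List Int)) (cur : List Int),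
    ts.foldl stepB (acc ++ [cur], some prev) =
      (acc ++ segsOf prev ts cur, some (ts.getLastD prev)) := by
  intro ts
  induction ts with
  | nil => intro prev acc cur; rfl
  | cons t ts ih =>
    intro prev acc cur
    rw [List.foldl_cons]
    by_cases h : t - prev > 1
    · have hstep : stepB (acc ++ [cur], some prev) t =
          ((acc ++ [cur]) ++ [[t]], some t) := by
        simp [stepB, if_pos h]
      rw [hstep, ih t (acc ++ [cur]) [t]]
      rw [List.getLastD_cons]
      simp [segsOf, if_pos h, List.append_assoc]
    · have hstep : stepB (acc ++ [cur], some prev) t =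
          (acc ++ [cur ++ [t]], some t) := by
        simp [stepB, if_neg h]
      rw [hstep, ih t acc (cur ++ [t])]
      rw [List.getLastD_cons]
      simp [segsOf, if_neg h]

lemma segs_foldl : ∀ (ts : List Int) (prev : Int) (cur : List Int) (a : Int),
    ((segsOf prev ts cur).map (fun s => PySem.List.len s)).foldl max a =
      max a (resMax prev ts (cur.length : Int)) := by
  intro ts
  induction ts with
  | nil =>
    intro prev cur a
    simp [segsOf, resMax, PySem.List.len_eq]
  | cons t ts ih =>
    intro prev cur a
    by_cases h : t - prev > 1
    · have h' : ¬ (t - prev ≤ 1) := by omega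
      simp only [segsOf, if_pos h, List.map_cons, List.foldl_cons, resMax, if_neg h']
      rw [ih t [t] (max a (PySem.List.len cur))]
      simp [PySem.List.len_eq, max_assoc]
    · have h' : t - prev ≤ 1 := by omega
      simp only [segsOf, if_neg h, resMax, if_pos h']
      rw [ih t (cur ++ [t]) a]
      have hc : (((cur ++ [t]).length : Nat) : Int) = (cur.length : Int) + 1 := by simp
      rw [hc]

lemma segs_maxD : ∀ (ts : List Int) (prev : Int) (cur : List Int),
    PySem.List.maxD ((segsOf prev ts cur).map (fun s => PySem.List.len s)) (fun y => y) 0 =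
      resMax prev ts (cur.length : Int) := by
  intro ts
  induction ts with
  | nil =>
    intro prev cur
    simp [segsOf, resMax, PySem.List.maxD, PySem.List.max?_id_cons, PySem.List.len_eq]
  | cons t ts ih =>
    intro prev cur
    by_cases h : t - prev > 1
    · have h' : ¬ (t - prev ≤ 1) := by omega
      simp only [segsOf, if_pos h, List.map_cons, resMax, if_neg h']
      rw [PySem.List.maxD, PySem.List.max?_id_cons, Option.getD_some]
      rw [segs_foldl ts t [t] (PySem.List.len cur)]
      simp [PySem.List.len_eq]
    · have h' : t - prev ≤ 1 := by omega
      simp only [segsOf, if_neg h, resMax, if_pos h']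
      rw [ih t (cur ++ [t])]
      have hc : (((cur ++ [t]).length : Nat) : Int) = (cur.length : Int) + 1 := by simp
      rw [hc]

lemma altCore_eq : ∀ (x : Int) (t : List Int),
    maxTicketsAltCore (x :: t) = resMax x t 1 := by
  intro x t
  unfold maxTicketsAltCore
  rw [List.foldl_cons]
  have hstep : stepB ([[]], none) x = ([] ++ [[x]], some x) := rfl
  rw [hstep, B_fold t x [] [x]]
  simp only [List.nil_append]
  rw [segs_maxD t x [x]]
  simp only [List.length_singleton, Nat.cast_one]
  exact max_eq_left (le_resMax t x 1)

lemma core_eq : ∀ (s : List Int), maxTicketsLoop s = maxTicketsAltCore s := by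
  intro s
  cases s with
  | nil => decide
  | cons x t => rw [loopA_eq x t, altCore_eq x t]

-- ===== VERDICT (by name: the statement is the Claim_ definition above) =====
theorem maxTickets_spec : Claim_equal_maxTickets := by
  intro tickets _
  unfold Spec_maxTickets maxTickets maxTickets_alt
  exact core_eq _
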